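-- pv_equiv track=rewrite | github.com/Yur3ka/Leetcode | 3601-find-the-k-th-character-in-string-game-ii/find-the-k-th-character-in-string-game-ii.py | kthCharacter
-- ===== SOURCE A (Python) =====
-- from typing import List
--
-- def kthCharacter(k: int, operations: List[int]) -> str:
--     def get_heigh(pos):
--         ans = 0
--         curr = 1
--         while curr < pos:
--             curr *= 2
--             ans += 1
--         return ans
--
--     def get_char(pos):
--         if pos == 1:
--             return 0
--         h = get_heigh(pos)
--         return get_char(pos-2**(h-1)) + operations[h-1]
--
--     ans = get_char(k)
--     return chr(ord('a')+ans%26)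
-- ===== SOURCE B (Python) =====
-- from typing import List
--
-- def kthCharacter(k: int, operations: List[int]) -> str:
--     # One pass over the bits of k-1, low to high: bit i set means the character
--     # was shifted by operations[i] at doubling step i.
--     m = k - 1
--     total = 0
--     i = 0
--     while m > 0:
--         if m % 2 == 1:
--             total += operations[i]
--         m //= 2
--         i += 1
--     return chr(ord('a') + total % 26)
-- ===== Notes on version B (the rewrite author's own statement) =====
-- stated objective: alternative
-- what changed: Replaced A's recursive top-down descent, which re-searches the doubling height from 1 at every level, with a single low-to-high loop over the bits of k-1 that sums operations[i] for each set bit.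
import Mathlib
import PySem

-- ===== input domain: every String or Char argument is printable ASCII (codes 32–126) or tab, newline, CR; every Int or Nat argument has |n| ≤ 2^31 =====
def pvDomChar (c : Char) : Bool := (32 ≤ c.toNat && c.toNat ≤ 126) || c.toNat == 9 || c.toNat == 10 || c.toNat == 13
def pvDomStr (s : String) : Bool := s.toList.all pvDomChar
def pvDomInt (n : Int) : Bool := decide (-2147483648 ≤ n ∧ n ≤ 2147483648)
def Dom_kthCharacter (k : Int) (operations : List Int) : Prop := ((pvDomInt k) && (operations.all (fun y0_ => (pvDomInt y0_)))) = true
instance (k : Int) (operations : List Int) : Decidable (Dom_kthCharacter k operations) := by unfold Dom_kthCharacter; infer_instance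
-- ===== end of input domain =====

-- B replaces A's recursive descent with its repeated height search by one low-to-high
-- loop over the bits of k-1 summing the matching operations (alternative algorithm).

-- ===== PORT A =====
-- while curr < pos: curr *= 2; ans += 1   (the '0 < curr' guard only makes the Lean
-- recursion total; every actual call has curr ≥ 1, where it never fires differently)
def getHeighAux (pos curr ans : Int) : Int :=
  if _h : 0 < curr ∧ curr < pos then getHeighAux pos (curr * 2) (ans + 1) else ans
termination_by (pos - curr).toNat
decreasing_by omega

def getHeigh (pos : Int) : Int := getHeighAux pos 1 0

-- get_char: 'pos ≤ 1' instead of 'pos == 1' only for totality — Python never returns for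
-- pos ≤ 0 (RecursionError); operations[h-1] out of range (IndexError) is excluded by Pre_.
def getChar (operations : List Int) (pos : Int) : Int :=
  if pos ≤ 1 then 0
  else
    getChar operations (pos - 2 ^ (getHeigh pos - 1).toNat) +
      (PySem.List.pyGet? operations (getHeigh pos - 1)).getD 0
termination_by pos.toNat
decreasing_by
  have h1 : (0:Int) < 2 ^ (getHeigh pos - 1).toNat := pow_pos (by norm_num) _
  omega

def kthCharacter (k : Int) (operations : List Int) : String :=
  String.singleton (Char.ofNat (97 + PySem.Int.mod (getChar operations k) 26).toNat)

-- ===== PORT B =====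
-- while m > 0: if m % 2 == 1: total += operations[i]; m //= 2; i += 1
-- (operations[i] is read only under a set bit; out of range (IndexError) is outside Pre_)
def altLoop (operations : List Int) (m i total : Int) : Int :=
  if 0 < m then
    altLoop operations (PySem.Int.floordiv m 2) (i + 1)
      (if PySem.Int.mod m 2 == 1 then total + (PySem.List.pyGet? operations i).getD 0 else total)
  else total
termination_by m.toNat
decreasing_by
  have h : PySem.Int.floordiv m 2 = m / 2 := PySem.Int.floordiv_eq_ediv_of_pos (by norm_num)
  rw [h]; omega

def kthCharacter_alt (k : Int) (operations : List Int) : String :=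
  String.singleton (Char.ofNat (97 + PySem.Int.mod (altLoop operations (k - 1) 0 0) 26).toNat)

-- ===== PRECONDITION & SPEC =====
-- A raises (RecursionError for k ≤ 0, IndexError once the height exceeds len(operations))
-- exactly outside this condition.
def Pre_kthCharacter (k : Int) (operations : List Int) : Prop :=
  1 ≤ k ∧ k - 1 < 2 ^ operations.length

instance (k : Int) (operations : List Int) : Decidable (Pre_kthCharacter k operations) := by
  unfold Pre_kthCharacter; infer_instance

def pvWitness_kthCharacter : Int × List Int := (3, [1, 0])

def Spec_kthCharacter (k : Int) (operations : List Int) (out : String) : Prop :=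
  out = kthCharacter_alt k operations

instance (k : Int) (operations : List Int) (out : String) : Decidable (Spec_kthCharacter k operations out) := by
  unfold Spec_kthCharacter; infer_instance

-- ===== CLAIM (what is proved, stated in full; the proofs are below) =====
def Claim_equal_kthCharacter : Prop := ∀ (k : Int) (operations : List Int), Dom_kthCharacter k operations → Pre_kthCharacter k operations → Spec_kthCharacter k operations (kthCharacter k operations)

-- ===== LEMMAS AND PROOFS =====

lemma altLoop_nonpos (ops : List Int) (m i a : Int) (h : ¬ 0 < m) : altLoop ops m i a = a := by
  rw [altLoop, if_neg h]

lemma altLoop_step (ops : List Int) (m i total : Int) (hm : 0 ≤ m) :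
    altLoop ops m i total =
      altLoop ops (PySem.Int.floordiv m 2) (i + 1)
        (if PySem.Int.mod m 2 == 1 then total + (PySem.List.pyGet? ops i).getD 0 else total) := by
  by_cases h : 0 < m
  · rw [altLoop, if_pos h]
  · have hm0 : m = 0 := by omega
    subst hm0
    have e1 : PySem.Int.mod (0:Int) 2 = 0 := by decide
    have e2 : PySem.Int.floordiv (0:Int) 2 = 0 := by decide
    rw [altLoop_nonpos _ _ _ _ (by norm_num), e1, e2, altLoop_nonpos _ _ _ _ (by norm_num)]
    norm_num

lemma altLoop_acc : ∀ (N : Nat) (m : Int), m.toNat ≤ N → ∀ (ops : List Int) (i a : Int),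
    altLoop ops m i a = a + altLoop ops m i 0 := by
  intro N
  induction N with
  | zero =>
    intro m hN ops i a
    rw [altLoop_nonpos _ _ _ _ (by omega), altLoop_nonpos _ _ _ _ (by omega)]
    ring
  | succ N ih =>
    intro m hN ops i a
    by_cases h : 0 < m
    · have hd : PySem.Int.floordiv m 2 = m / 2 := PySem.Int.floordiv_eq_ediv_of_pos (by norm_num)
      rw [altLoop_step ops m i a (by omega), altLoop_step ops m i 0 (by omega), hd,
          ih (m / 2) (by omega) ops (i + 1)
            (if PySem.Int.mod m 2 == 1 then a + (PySem.List.pyGet? ops i).getD 0 else a),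
          ih (m / 2) (by omega) ops (i + 1)
            (if PySem.Int.mod m 2 == 1 then 0 + (PySem.List.pyGet? ops i).getD 0 else 0)]
      split <;> ring
    · rw [altLoop_nonpos _ _ _ _ h, altLoop_nonpos _ _ _ _ h]; ring

lemma altLoop_clear_top : ∀ (n : Nat) (ops : List Int) (m i : Int),
    0 ≤ i → (2:Int) ^ n ≤ m → m < 2 ^ (n + 1) → i + (n:Int) < ops.length →
    altLoop ops m i 0 = altLoop ops (m - 2 ^ n) i 0 + ops.getD (i.toNat + n) 0 := by
  intro n
  induction n with
  | zero =>
    intro ops m i hi h1 h2 h3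
    have hm : m = 1 := by norm_num at h1 h2; omega
    subst hm
    have hlt : i.toNat < ops.length := by omega
    have e1 : PySem.Int.mod (1:Int) 2 = 1 := by decide
    have e2 : PySem.Int.floordiv (1:Int) 2 = 0 := by decide
    rw [altLoop, if_pos (by norm_num), e1, e2,
        altLoop_nonpos _ _ _ _ (by norm_num),
        show (1:Int) - 2 ^ 0 = 0 by norm_num,
        altLoop_nonpos _ _ _ _ (by norm_num)]
    simp [PySem.List.pyGet?_of_nonneg _ hi, List.getD_eq_getElem?_getD]
  | succ n' ih =>
    intro ops m i hi h1 h2 h3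
    have hp : (2:Int) ^ (n' + 1) = 2 * 2 ^ n' := by ring
    have hp2 : (2:Int) ^ (n' + 1 + 1) = 4 * 2 ^ n' := by ring
    have hpos : (0:Int) < 2 ^ n' := pow_pos (by norm_num) _
    have hmod : PySem.Int.mod m 2 = m % 2 := PySem.Int.mod_eq_emod_of_pos (by norm_num)
    have hmod' : PySem.Int.mod (m - 2 ^ (n' + 1)) 2 = (m - 2 ^ (n' + 1)) % 2 :=
      PySem.Int.mod_eq_emod_of_pos (by norm_num)
    have hdiv : PySem.Int.floordiv m 2 = m / 2 := PySem.Int.floordiv_eq_ediv_of_pos (by norm_num)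
    have hdiv' : PySem.Int.floordiv (m - 2 ^ (n' + 1)) 2 = (m - 2 ^ (n' + 1)) / 2 :=
      PySem.Int.floordiv_eq_ediv_of_pos (by norm_num)
    have hpar : (m - 2 ^ (n' + 1)) % 2 = m % 2 := by rw [hp]; omega
    have hhalf : (m - 2 ^ (n' + 1)) / 2 = m / 2 - 2 ^ n' := by rw [hp]; omega
    rw [altLoop_step ops m i 0 (by omega),
        altLoop_step ops (m - 2 ^ (n' + 1)) i 0 (by rw [hp2] at h2; rw [hp] at h1 ⊢; omega),
        hmod, hmod', hdiv, hdiv', hpar, hhalf,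
        altLoop_acc (m / 2).toNat (m / 2) (le_refl _) ops (i + 1)
          (if m % 2 == 1 then 0 + (PySem.List.pyGet? ops i).getD 0 else 0),
        altLoop_acc (m / 2 - 2 ^ n').toNat (m / 2 - 2 ^ n') (le_refl _) ops (i + 1)
          (if m % 2 == 1 then 0 + (PySem.List.pyGet? ops i).getD 0 else 0),
        ih ops (m / 2) (i + 1) (by omega)
          (by rw [hp] at h1; omega) (by rw [hp2] at h2; rw [hp]; omega) (by omega)]
    have hIdx : (i + 1).toNat + n' = i.toNat + (n' + 1) := by omega
    rw [hIdx]
    ring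

lemma getHeighAux_spec : ∀ (fuel : Nat) (pos curr ans : Int), (pos - curr).toNat ≤ fuel →
    0 < curr → curr < pos →
    ∃ n : Nat, getHeighAux pos curr ans = ans + (n:Int) + 1 ∧
      curr * 2 ^ n < pos ∧ pos ≤ curr * 2 ^ (n + 1) := by
  intro fuel
  induction fuel with
  | zero => intro pos curr ans hf hc hlt; omega
  | succ f ih =>
    intro pos curr ans hf hc hlt
    rw [getHeighAux, dif_pos ⟨hc, hlt⟩]
    by_cases h2 : curr * 2 < pos
    · obtain ⟨n', heq, hb1, hb2⟩ := ih pos (curr * 2) (ans + 1) (by omega) (by omega) h2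
      refine ⟨n' + 1, ?_, ?_, ?_⟩
      · rw [heq]; push_cast; ring
      · calc curr * 2 ^ (n' + 1) = curr * 2 * 2 ^ n' := by ring
          _ < pos := hb1
      · calc pos ≤ curr * 2 * 2 ^ (n' + 1) := hb2
          _ = curr * 2 ^ (n' + 1 + 1) := by ring
    · rw [getHeighAux, dif_neg (by omega)]
      exact ⟨0, by ring, by simpa using hlt, by norm_num; omega⟩

lemma getHeigh_spec (pos : Int) (h2 : 2 ≤ pos) :
    ∃ n : Nat, getHeigh pos = (n:Int) + 1 ∧ (2:Int) ^ n < pos ∧ pos ≤ 2 ^ (n + 1) := by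
  obtain ⟨n, heq, hb1, hb2⟩ :=
    getHeighAux_spec (pos - 1).toNat pos 1 0 (by omega) (by norm_num) (by omega)
  exact ⟨n, by rw [getHeigh, heq]; ring, by simpa using hb1, by simpa using hb2⟩

lemma getChar_eq : ∀ (N : Nat) (pos : Int) (ops : List Int), pos.toNat ≤ N → 1 ≤ pos →
    pos - 1 < 2 ^ ops.length → getChar ops pos = altLoop ops (pos - 1) 0 0 := by
  intro N
  induction N with
  | zero => intro pos ops hN h1 _; omega
  | succ N ih =>
    intro pos ops hN h1 h2
    by_cases hp : pos ≤ 1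
    · have : pos = 1 := by omega
      subst this
      rw [getChar, if_pos (by norm_num)]
      rw [show (1:Int) - 1 = 0 by norm_num, altLoop_nonpos _ _ _ _ (by norm_num)]
    · obtain ⟨n, hh, hb1, hb2⟩ := getHeigh_spec pos (by omega)
      have hpos : (0:Int) < 2 ^ n := pow_pos (by norm_num) _
      have hnlen : n < ops.length := by
        by_contra hcon
        have : (2:Int) ^ ops.length ≤ 2 ^ n :=
          pow_le_pow_right₀ (by norm_num) (by omega)
        omega
      have hidx : (getHeigh pos - 1) = (n : Int) := by omega
      rw [getChar, if_neg hp, hidx]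
      simp only [Int.toNat_natCast, PySem.List.pyGet?_natCast]
      have hget : (ops[n]?).getD 0 = ops.getD n 0 := by
        simp [List.getD_eq_getElem?_getD]
      rw [hget, ih (pos - 2 ^ n) ops (by omega) (by omega) (by omega)]
      have := altLoop_clear_top n ops (pos - 1) 0 (by norm_num) (by omega) (by omega) (by omega)
      rw [this, show pos - 2 ^ n - 1 = pos - 1 - 2 ^ n from by ring]
      norm_num

-- ===== VERDICT (by name: the statement is the Claim_ definition above) =====
theorem kthCharacter_spec : Claim_equal_kthCharacter := by
  intro k ops _ hpre
  unfold Spec_kthCharacter kthCharacter kthCharacter_alt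
  obtain ⟨h1, h2⟩ := hpre
  rw [getChar_eq k.toNat k ops (le_refl _) h1 h2]
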